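-- pv_equiv track=rewrite | github.com/snsunx/fd-greens | src/number_state_solvers.py | get_number_state_indices
-- ===== SOURCE A (Python) =====
-- from typing import Union, Tuple, List, Iterable, Optional, Sequence, Callable
-- from itertools import combinations
--
-- def get_number_state_indices(n_orb: int,
--                              n_elec: int,
--                              anc: Iterable[str] = '',
--                              return_type: str = 'decimal',
--                              reverse: bool = True) -> List[int]:
--     """Obtains the indices corresponding to a certain number of electrons.
--
--     Args:
--         n_orb: An integer indicating the number of orbitals.
--         n_elec: An integer indicating the number of electrons.
--         anc: An iterable of '0' and '1' indicating the state of the ancilla qubit(s).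
--         return_type: Type of the indices returned. Must be 'decimal' or 'binary'. Default to 'decimal'.
--         reverse: Whether the qubit indices are reversed because of Qiskit qubit order. Default to True.
--     """
--     assert return_type in ['binary', 'decimal']
--     inds = []
--     for tup in combinations(range(n_orb), n_elec):
--         bin_list = ['1' if (n_orb - 1 - i) in tup else '0'
--                     for i in range(n_orb)]
--         # TODO: Technically the anc[::-1] can be taken care of outside this function.
--         # Should implement binary indices in both list form and string form
--         if reverse:
--             bin_str = ''.join(bin_list) + anc[::-1]
--         else:
--             bin_str = anc + ''.join(bin_list)
--         inds.append(bin_str)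
--     if reverse:
--         inds = sorted(inds, reverse=True)
--     if return_type == 'decimal':
--         inds = [int(s, 2) for s in inds]
--     return inds
-- ===== SOURCE B (Python) =====
-- from itertools import combinations
--
-- def _masks(lo, n, k):
--     """All k-subsets of orbitals lo..n-1, directly as integer bitmasks,
--     in the same order as itertools.combinations(range(lo, n), k)."""
--     if k == 0:
--         return [0]
--     if n - lo < k:
--         return []
--     return [(1 << lo) + m for m in _masks(lo + 1, n, k - 1)] + _masks(lo + 1, n, k)
--
-- def get_number_state_indices(n_orb, n_elec, anc='', return_type='decimal', reverse=True):
--     assert return_type in ['binary', 'decimal']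
--     n_anc = len(anc)
--     width = n_orb if n_orb > 0 else 0
--     masks = _masks(0, n_orb, n_elec)
--     vals = []
--     if masks:
--         anc_val = int(anc, 2) if anc else 0
--         anc_rev_val = int(anc[::-1], 2) if anc else 0
--         if reverse:
--             vals = [(m << n_anc) + anc_rev_val for m in masks]
--             vals.sort(reverse=True)
--         else:
--             vals = [(anc_val << width) + m for m in masks]
--     if return_type == 'binary':
--         return [format(v, '0{}b'.format(width + n_anc)) for v in vals]
--     return vals
-- ===== Notes on version B (the rewrite author's own statement) =====
-- stated objective: alternative
-- what changed: B never builds or parses bit strings: it enumerates the n_elec-subsets directly as integer bitmasks by a recursion over orbitals, folds the ancilla in arithmetically (shift and add), and sorts integers descending instead of equal-width binary strings.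
-- outside the precondition, e.g. on get_number_state_indices(2, 1, '1_0', 'decimal', True): A returns [9, 5], B returns [17, 9]; on get_number_state_indices(2, 1, '1', 'binary', True): A returns ['101', '011'], B returns ['101', '011']
import Mathlib
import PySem

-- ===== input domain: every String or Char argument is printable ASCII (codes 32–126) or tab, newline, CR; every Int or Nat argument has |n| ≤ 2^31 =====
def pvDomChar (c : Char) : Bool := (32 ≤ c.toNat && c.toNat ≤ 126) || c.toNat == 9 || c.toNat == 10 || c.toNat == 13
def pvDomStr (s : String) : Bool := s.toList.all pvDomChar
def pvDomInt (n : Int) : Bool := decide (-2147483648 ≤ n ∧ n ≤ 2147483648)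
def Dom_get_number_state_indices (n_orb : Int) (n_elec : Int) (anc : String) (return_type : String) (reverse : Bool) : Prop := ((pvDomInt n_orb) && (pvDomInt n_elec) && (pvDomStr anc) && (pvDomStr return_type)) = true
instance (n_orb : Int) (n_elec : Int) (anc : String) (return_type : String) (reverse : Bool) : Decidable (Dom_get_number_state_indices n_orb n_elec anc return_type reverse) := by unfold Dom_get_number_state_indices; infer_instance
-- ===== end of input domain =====

-- B replaces A's bit-string building/parsing/sorting by a recursive enumeration of integer
-- bitmasks with arithmetic ancilla folding and an integer sort (objective: alternative).


-- ===== PORT A =====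
-- int(s, 2): exact on the strings of '0'/'1' characters admitted by Pre_ (both Pythons
-- only apply it to such strings there)
def pyBin (s : List Char) : Int := s.foldl (fun a c => 2 * a + (if c = '1' then 1 else 0)) 0

-- itertools.combinations(l, k), tuples in itertools' order (shared library helper of both ports)
def combos : List Int → Nat → List (List Int)
  | _, 0 => [[]]
  | [], _ + 1 => []
  | x :: xs, k + 1 => (combos xs k).map (fun t => x :: t) ++ combos xs (k + 1)

-- A. The failed assert (return_type ∉ {'binary','decimal'}), the 'binary' return (a list of
-- strings, outside the declared List Int type), negative n_elec (ValueError in combinations)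
-- and int('', 2) (ValueError) are all excluded by Pre_; the port parses unconditionally.
def get_number_state_indices (n_orb : Int) (n_elec : Int) (anc : String) (return_type : String) (reverse : Bool) : List Int :=
  let inds : List String :=
    (combos (PySem.List.pyRange 0 n_orb 1) n_elec.toNat).map (fun tup =>
      let bin_list : List Char :=
        (PySem.List.pyRange 0 n_orb 1).map (fun i => if n_orb - 1 - i ∈ tup then '1' else '0')
      if reverse then String.ofList (bin_list ++ anc.toList.reverse)   -- ''.join(bin_list) + anc[::-1]
      else String.ofList (anc.toList ++ bin_list))                     -- anc + ''.join(bin_list)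
  let inds := if reverse then PySem.List.sorted inds (fun s => s) true else inds
  inds.map (fun s => pyBin s.toList)

-- ===== PORT B =====
-- _masks(lo, n, k) of Source B; lo, n are Nats here (Source B only calls it with 0 ≤ lo ≤ n after the
-- top-level call below, where a negative n_orb behaves like 0 through the 'n - lo < k' guard)
def masksAux (lo n : Nat) (k : Nat) : List Int :=
  match k with
  | 0 => [0]
  | k + 1 =>
    if h : n - lo < k + 1 then []
    else ((masksAux (lo + 1) n k).map (fun m => 2 ^ lo + m)) ++ masksAux (lo + 1) n (k + 1)
termination_by n - lo
decreasing_by all_goals omega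

-- B. (m << s) is m * 2^s; width = 'n_orb if n_orb > 0 else 0' is n_orb.toNat; the 'binary'
-- return branch of Source B (list of strings, outside the declared type) is excluded by Pre_.
def get_number_state_indices_alt (n_orb : Int) (n_elec : Int) (anc : String) (return_type : String) (reverse : Bool) : List Int :=
  let n_anc := anc.toList.length
  let width := n_orb.toNat
  let masks := masksAux 0 n_orb.toNat n_elec.toNat
  if masks = [] then []
  else
    let anc_val : Int := if anc = "" then 0 else pyBin anc.toList
    let anc_rev_val : Int := if anc = "" then 0 else pyBin anc.toList.reverse
    if reverse then
      PySem.List.sorted (masks.map (fun m => m * 2 ^ n_anc + anc_rev_val)) (fun x => x) true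
    else
      masks.map (fun m => anc_val * 2 ^ width + m)

-- ===== PRECONDITION & SPEC =====
-- Pre_ admits exactly the calls returning a list of ints: return_type must be 'decimal' (the
-- 'binary' return is a list of strings, not of the declared type; any other value fails A's
-- assert); n_elec must be ≥ 0 (combinations raises ValueError); and whenever anc is actually
-- parsed (some combination exists, i.e. unless 1 ≤ n_elec ∧ n_orb < n_elec) anc must consist
-- of '0'/'1' characters (its documented domain; other base-2 int literals such as '1_0' or
-- ' 1 ' are not modeled) and the corner n_orb ≤ 0 ∧ n_elec = 0 ∧ anc = '' (int('', 2)) is out.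
-- ('binary' calls are admitted only when no combination exists, where A returns the empty
-- list — a list of ints; a nonempty 'binary' result is a list of strings and stays outside).
def Pre_get_number_state_indices (n_orb : Int) (n_elec : Int) (anc : String) (return_type : String) (reverse : Bool) : Prop :=
  0 ≤ n_elec ∧
    ((return_type = "decimal" ∧ anc.toList.all (fun c => c = '0' || c = '1') = true ∧
        (0 < n_orb ∨ n_elec ≠ 0 ∨ anc ≠ "")) ∨
      ((return_type = "decimal" ∨ return_type = "binary") ∧ 1 ≤ n_elec ∧ n_orb < n_elec))
instance (n_orb : Int) (n_elec : Int) (anc : String) (return_type : String) (reverse : Bool) : Decidable (Pre_get_number_state_indices n_orb n_elec anc return_type reverse) := by unfold Pre_get_number_state_indices; infer_instance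

def pvWitness_get_number_state_indices : Int × Int × String × String × Bool := (3, 1, "10", "decimal", true)

def Spec_get_number_state_indices (n_orb : Int) (n_elec : Int) (anc : String) (return_type : String) (reverse : Bool) (out : List Int) : Prop := out = get_number_state_indices_alt n_orb n_elec anc return_type reverse
instance (n_orb : Int) (n_elec : Int) (anc : String) (return_type : String) (reverse : Bool) (out : List Int) : Decidable (Spec_get_number_state_indices n_orb n_elec anc return_type reverse out) := by unfold Spec_get_number_state_indices; infer_instance

-- ===== CLAIM (what is proved, stated in full; the proofs are below) =====
def Claim_equal_get_number_state_indices : Prop := ∀ (n_orb : Int) (n_elec : Int) (anc : String) (return_type : String) (reverse : Bool), Dom_get_number_state_indices n_orb n_elec anc return_type reverse → Pre_get_number_state_indices n_orb n_elec anc return_type reverse → Spec_get_number_state_indices n_orb n_elec anc return_type reverse (get_number_state_indices n_orb n_elec anc return_type reverse)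
-- ===== LEMMAS AND PROOFS =====

-- sum of 2^j over an orbital tuple: the mask a tuple denotes
def maskOf (t : List Int) : Int := t.foldr (fun j a => 2 ^ j.toNat + a) 0

-- the bit string A builds for a tuple (before the ancilla is attached)
def blist (n_orb : Int) (tup : List Int) : List Char :=
  (PySem.List.pyRange 0 n_orb 1).map (fun i => if n_orb - 1 - i ∈ tup then '1' else '0')

theorem pyBin_from (l : List Char) (a : Int) :
    l.foldl (fun a c => 2 * a + (if c = '1' then 1 else 0)) a = a * 2 ^ l.length + pyBin l := by
  induction l generalizing a with
  | nil => simp [pyBin]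
  | cons c t ih =>
    simp only [List.foldl_cons, List.length_cons, pyBin]
    rw [ih, ih (2 * 0 + _)]
    ring

theorem pyBin_cons (c : Char) (t : List Char) :
    pyBin (c :: t) = (if c = '1' then (1:Int) else 0) * 2 ^ t.length + pyBin t := by
  simp only [pyBin, List.foldl_cons]
  rw [pyBin_from]
  have h : (2 * 0 + (if c = '1' then (1:Int) else 0)) = (if c = '1' then 1 else 0) := by ring
  rw [h]
  rfl

theorem pyBin_append (l1 l2 : List Char) :
    pyBin (l1 ++ l2) = pyBin l1 * 2 ^ l2.length + pyBin l2 := by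
  simp only [pyBin, List.foldl_append]
  rw [pyBin_from l2]
  rfl

theorem pyBin_nonneg (l : List Char) : 0 ≤ pyBin l := by
  induction l with
  | nil => simp [pyBin]
  | cons c t ih => rw [pyBin_cons]; split_ifs <;> positivity

theorem pyBin_lt (l : List Char) : pyBin l < 2 ^ l.length := by
  induction l with
  | nil => simp [pyBin]
  | cons c t ih =>
    rw [pyBin_cons]
    simp only [List.length_cons, pow_succ]
    split_ifs <;> nlinarith [pyBin_nonneg t]

theorem pyBin_strict_mono (l1 l2 : List Char) (hlen : l1.length = l2.length)
    (h1 : ∀ c ∈ l1, c = '0' ∨ c = '1') (h2 : ∀ c ∈ l2, c = '0' ∨ c = '1')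
    (hlt : List.Lex (· < ·) l1 l2) : pyBin l1 < pyBin l2 := by
  induction hlt with
  | nil => simp at hlen
  | @rel c t1 d t2 hcd =>
    have hc := h1 c (by simp); have hd := h2 d (by simp)
    have hc0 : c = '0' := by
      rcases hc with h | h <;> rcases hd with h' | h' <;> subst h <;> subst h' <;>
        first | rfl | (exfalso; exact absurd hcd (by decide))
    have hd1 : d = '1' := by
      rcases hc with h | h <;> rcases hd with h' | h' <;> subst h <;> subst h' <;>
        first | rfl | (exfalso; exact absurd hcd (by decide))
    subst hc0; subst hd1
    rw [pyBin_cons, pyBin_cons]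
    simp only [List.length_cons] at hlen
    have h := pyBin_lt t1
    have h' := pyBin_nonneg t2
    have hl : t1.length = t2.length := by omega
    rw [hl] at h
    have e0 : (if '0' = '1' then (1:Int) else 0) = 0 := by decide
    have e1 : (if '1' = '1' then (1:Int) else 0) = 1 := by decide
    rw [e0, e1]
    nlinarith
  | @cons c t1 t2 hrec ih =>
    simp only [List.length_cons] at hlen
    have := ih (by omega) (fun x hx => h1 x (by simp [hx])) (fun x hx => h2 x (by simp [hx]))
    have hl : t1.length = t2.length := by omega
    rw [pyBin_cons, pyBin_cons, hl]
    linarith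

theorem mem_combos_sublist : ∀ {l t : List Int} {k : Nat}, t ∈ combos l k → t.Sublist l := by
  intro l
  induction l with
  | nil =>
    intro t k h
    cases k with
    | zero => simp [combos] at h; simp [h]
    | succ k => simp [combos] at h
  | cons x xs ih =>
    intro t k h
    cases k with
    | zero => simp [combos] at h; simp [h]
    | succ k =>
      simp only [combos, List.mem_append, List.mem_map] at h
      rcases h with ⟨a, ha, rfl⟩ | h
      · exact List.Sublist.cons₂ x (ih ha)
      · exact List.Sublist.cons x (ih h)

theorem nodup_combos : ∀ (l : List Int) (k : Nat), l.Nodup → (combos l k).Nodup := by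
  intro l
  induction l with
  | nil =>
    intro k h
    cases k with
    | zero => simp [combos]
    | succ k => simp [combos]
  | cons x xs ih =>
    intro k h
    have hx : x ∉ xs := by simp [List.nodup_cons] at h; exact h.1
    have hxs : xs.Nodup := by simp [List.nodup_cons] at h; exact h.2
    cases k with
    | zero => simp [combos]
    | succ k =>
      simp only [combos]
      apply List.Nodup.append
      · exact (ih k hxs).map (fun a b hab => by simpa using hab)
      · exact ih (k + 1) hxs
      · intro t ht ht'
        simp only [List.mem_map] at ht
        rcases ht with ⟨a, _, rfl⟩
        have := mem_combos_sublist ht'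
        have : x ∈ xs := this.subset (by simp)
        exact hx this

theorem combos_eq_nil : ∀ {l : List Int} {k : Nat}, l.length < k → combos l k = [] := by
  intro l
  induction l with
  | nil =>
    intro k h
    cases k with
    | zero => omega
    | succ k => simp [combos]
  | cons x xs ih =>
    intro k h
    cases k with
    | zero => simp at h
    | succ k =>
      simp only [List.length_cons] at h
      simp only [combos, ih (by omega : xs.length < k), ih (by omega : xs.length < k + 1)]
      simp

theorem blist_inj {n_orb : Int} {t1 t2 : List Int}
    (h1 : t1.Sublist (PySem.List.pyRange 0 n_orb 1)) (h2 : t2.Sublist (PySem.List.pyRange 0 n_orb 1))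
    (h : blist n_orb t1 = blist n_orb t2) : t1 = t2 := by
  have hmem : ∀ j : Int, j ∈ t1 ↔ j ∈ t2 := by
    intro j
    by_cases hj : 0 ≤ j ∧ j < n_orb
    · have hi : n_orb - 1 - j ∈ PySem.List.pyRange 0 n_orb 1 := by
        rw [PySem.List.mem_pyRange_one]; omega
      have := (List.map_inj_left.mp h) (n_orb - 1 - j) hi
      have hjj : n_orb - 1 - (n_orb - 1 - j) = j := by omega
      rw [hjj] at this
      constructor
      · intro hm
        by_contra hm2
        rw [if_pos hm, if_neg hm2] at this
        exact absurd this (by decide)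
      · intro hm
        by_contra hm2
        rw [if_neg hm2, if_pos hm] at this
        exact absurd this (by decide)
    · constructor
      · intro hm
        have := (PySem.List.mem_pyRange_one).mp (h1.subset hm); omega
      · intro hm
        have := (PySem.List.mem_pyRange_one).mp (h2.subset hm); omega
  have hs1 : t1.Pairwise (· < ·) := (PySem.List.pairwise_lt_pyRange_one 0 n_orb).sublist h1
  have hs2 : t2.Pairwise (· < ·) := (PySem.List.pairwise_lt_pyRange_one 0 n_orb).sublist h2
  have hn1 : t1.Nodup := h1.nodup (PySem.List.nodup_pyRange_one 0 n_orb)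
  have hn2 : t2.Nodup := h2.nodup (PySem.List.nodup_pyRange_one 0 n_orb)
  have hperm : t1.Perm t2 := (List.perm_ext_iff_of_nodup hn1 hn2).mpr hmem
  exact List.Perm.eq_of_pairwise (fun a b _ _ h h' => le_antisymm h h')
    (hs1.imp le_of_lt) (hs2.imp le_of_lt) hperm

theorem maskOf_eq_sum (t : List Int) : maskOf t = (t.map (fun j => (2:Int) ^ j.toNat)).sum := by
  induction t with
  | nil => rfl
  | cons j r ih => simp [maskOf, List.sum_cons] at *; omega

theorem filter_mask_succ (tup : List Int) (hnd : tup.Nodup) (N : Nat) :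
    ((tup.filter (fun j => j < ((N:Int) + 1))).map (fun j => (2:Int) ^ j.toNat)).sum
      = (if (N:Int) ∈ tup then 2 ^ N else 0)
        + ((tup.filter (fun j => j < (N:Int))).map (fun j => (2:Int) ^ j.toNat)).sum := by
  induction tup with
  | nil => simp
  | cons j r ih =>
    have hj : j ∉ r := (List.nodup_cons.mp hnd).1
    have ih' := ih (List.nodup_cons.mp hnd).2
    by_cases h1 : j = (N:Int)
    · have hf1 : (j < (N:Int) + 1) := by omega
      have hf2 : ¬ (j < (N:Int)) := by omega
      have hNr : (N:Int) ∉ r := by rw [← h1]; exact hj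
      have htn : j.toNat = N := by omega
      rw [if_neg hNr] at ih'
      simp only [List.filter_cons, hf1, hf2, decide_true, decide_false, if_true,
        List.map_cons, List.sum_cons, List.mem_cons, if_pos (Or.inl h1.symm), htn]
      simp at ih' ⊢
      omega
    · have hNj : ¬ ((N:Int) = j) := fun h => h1 h.symm
      by_cases h2 : j < (N:Int)
      · have hf1 : j < (N:Int) + 1 := by omega
        simp only [List.filter_cons, hf1, h2, decide_true, if_true,
          List.map_cons, List.sum_cons, List.mem_cons]
        simp only [hNj, false_or]
        split_ifs at ih' ⊢ <;> linarith
      · have hf1 : ¬ (j < (N:Int) + 1) := by omega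
        simp only [List.filter_cons, hf1, h2, decide_false, List.mem_cons]
        simp only [hNj, false_or]
        exact ih'

theorem blist_eq_rev (n_orb : Int) (tup : List Int) :
    blist n_orb tup
      = ((List.range n_orb.toNat).map (fun (k : Nat) => if (k:Int) ∈ tup then '1' else '0')).reverse := by
  apply List.ext_getElem
  · simp [blist, PySem.List.length_pyRange_one]
  · intro i h1 h2
    have hi : i < n_orb.toNat := by
      simpa [blist, PySem.List.length_pyRange_one] using h1
    simp only [blist, List.getElem_map, PySem.List.getElem_pyRange_one, List.getElem_reverse,
      List.getElem_range, List.length_map, List.length_range]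
    have h : n_orb - 1 - (0 + (i:Int)) = ((n_orb.toNat - 1 - i : Nat) : Int) := by omega
    rw [h]

theorem pyBin_revmap (tup : List Int) (hnd : tup.Nodup) (hpos : ∀ j ∈ tup, 0 ≤ j) (N : Nat) :
    pyBin (((List.range N).map (fun (k : Nat) => if (k:Int) ∈ tup then '1' else '0')).reverse)
      = ((tup.filter (fun j => j < (N:Int))).map (fun j => (2:Int) ^ j.toNat)).sum := by
  induction N with
  | zero =>
    have : tup.filter (fun j => j < ((0:Nat):Int)) = [] := by
      apply List.filter_eq_nil_iff.mpr
      intro j hj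
      have := hpos j hj
      simp; omega
    rw [Nat.cast_zero] at this
    simp [this, pyBin]
  | succ N ih =>
    rw [List.range_succ, List.map_append, List.reverse_append]
    simp only [List.map_cons, List.map_nil, List.reverse_cons, List.reverse_nil,
      List.nil_append, List.cons_append]
    rw [pyBin_cons]
    have hlen : ((List.range N).map (fun (k : Nat) => if (k:Int) ∈ tup then '1' else '0')).reverse.length = N := by
      simp
    rw [hlen, ih]
    have hc : ((N:Int) + 1) = (((N+1:Nat)):Int) := by push_cast; ring
    rw [← hc, filter_mask_succ tup hnd N]
    by_cases hm : (N:Int) ∈ tup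
    · simp [hm]
    · simp [hm]

theorem pyBin_blist {n_orb : Int} {tup : List Int}
    (hsub : tup.Sublist (PySem.List.pyRange 0 n_orb 1)) :
    pyBin (blist n_orb tup) = maskOf tup := by
  have hnd : tup.Nodup := hsub.nodup (PySem.List.nodup_pyRange_one 0 n_orb)
  have hmem : ∀ j ∈ tup, 0 ≤ j ∧ j < n_orb := by
    intro j hj
    exact (PySem.List.mem_pyRange_one).mp (hsub.subset hj)
  rw [blist_eq_rev, pyBin_revmap tup hnd (fun j hj => (hmem j hj).1), maskOf_eq_sum]
  congr 1
  congr 1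
  apply List.filter_eq_self.mpr
  intro j hj
  have := hmem j hj
  simp only [decide_eq_true_eq]
  omega

theorem masksAux_eq_aux (n_orb : Int) :
    ∀ (f lo k : Nat), n_orb.toNat - lo ≤ f →
      masksAux lo n_orb.toNat k = (combos (PySem.List.pyRange (lo : Int) n_orb 1) k).map maskOf := by
  intro f
  induction f with
  | zero =>
    intro lo k hf
    cases k with
    | zero => simp [masksAux, combos, maskOf]
    | succ k =>
      rw [masksAux]
      rw [dif_pos (by omega)]
      rw [combos_eq_nil (by rw [PySem.List.length_pyRange_one]; omega)]
      simp
  | succ f ih =>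
    intro lo k hf
    cases k with
    | zero => simp [masksAux, combos, maskOf]
    | succ k =>
      rw [masksAux]
      by_cases hg : n_orb.toNat - lo < k + 1
      · rw [dif_pos hg]
        rw [combos_eq_nil (by rw [PySem.List.length_pyRange_one]; omega)]
        simp
      · rw [dif_neg hg]
        have hlt : (lo : Int) < n_orb := by omega
        rw [PySem.List.pyRange_one_cons hlt]
        show _ = (combos (_ :: _) (k+1)).map maskOf
        simp only [combos, List.map_append, List.map_map]
        have h1 := ih (lo + 1) k (by omega)
        have h2 := ih (lo + 1) (k + 1) (by omega)
        push_cast at h1 h2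
        rw [h1, h2]
        congr 1
        rw [List.map_map]
        apply List.map_congr_left
        intro t _
        simp only [Function.comp_apply, maskOf, List.foldr_cons]
        congr 1

theorem sort_transfer (S : List String) (hnd : S.Nodup)
    (hmono : ∀ s ∈ S, ∀ t ∈ S, t ≤ s → t ≠ s → pyBin t.toList < pyBin s.toList) :
    (PySem.List.sorted S (fun s => s) true).map (fun s => pyBin s.toList)
      = PySem.List.sorted (S.map (fun s => pyBin s.toList)) (fun x => x) true := by
  symm
  apply PySem.List.sorted_rev_eq_of_perm_of_pairwise_gt
  · exact (PySem.List.sorted_perm S (fun s => s) true).map (fun s => pyBin s.toList)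
  · rw [List.pairwise_map]
    have hle := PySem.List.sorted_pairwise_rev S (fun s => s)
    have hsn : (PySem.List.sorted S (fun s => s) true).Nodup :=
      ((PySem.List.sorted_perm S (fun s => s) true).symm).nodup hnd
    refine (hle.and hsn).imp_of_mem ?_
    intro a b ha hb hab
    have haS : a ∈ S := (PySem.List.mem_sorted S (fun s => s) true a).mp ha
    have hbS : b ∈ S := (PySem.List.mem_sorted S (fun s => s) true b).mp hb
    exact hmono a haS b hbS hab.1 (fun h => hab.2 h.symm)


theorem sorted_rev_nil_str : PySem.List.sorted ([] : List String) (fun s => s) true = [] := by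
  simpa using (PySem.List.sorted_perm ([] : List String) (fun s => s) true).eq_nil

theorem sorted_rev_nil_int : PySem.List.sorted ([] : List Int) (fun x => x) true = [] := by
  simpa using (PySem.List.sorted_perm ([] : List Int) (fun x => x) true).eq_nil

-- ===== VERDICT (by name: the statement is the Claim_ definition above) =====

theorem get_number_state_indices_spec : Claim_equal_get_number_state_indices := by
  intro n_orb n_elec anc return_type reverse _ hpre
  obtain ⟨-, hpre3⟩ := hpre
  unfold Spec_get_number_state_indices get_number_state_indices get_number_state_indices_alt
  rcases hpre3 with ⟨-, hanc0, -⟩ | ⟨-, hempty⟩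
  case inr =>
    -- no combination of n_elec orbitals exists: both programs return []
    have hnil : combos (PySem.List.pyRange 0 n_orb 1) n_elec.toNat = [] :=
      combos_eq_nil (by rw [PySem.List.length_pyRange_one]; omega)
    have hmask : masksAux 0 n_orb.toNat n_elec.toNat = ([] : List Int) := by
      have := masksAux_eq_aux n_orb (n_orb.toNat) 0 n_elec.toNat (by omega)
      simpa [hnil] using this
    rw [hnil, hmask]
    cases reverse <;> simp [sorted_rev_nil_str, sorted_rev_nil_int]
  have hanc : ∀ c ∈ anc.toList, c = '0' ∨ c = '1' := by
    intro c hc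
    have := List.all_eq_true.mp hanc0 c hc
    simpa using this
  have hmask : masksAux 0 n_orb.toNat n_elec.toNat
      = (combos (PySem.List.pyRange 0 n_orb 1) n_elec.toNat).map maskOf := by
    have := masksAux_eq_aux n_orb (n_orb.toNat) 0 n_elec.toNat (by omega)
    simpa using this
  by_cases hm : masksAux 0 n_orb.toNat n_elec.toNat = []
  case pos =>
    -- no combination exists here either: both programs return []
    have hcnil : combos (PySem.List.pyRange 0 n_orb 1) n_elec.toNat = [] :=
      List.map_eq_nil_iff.mp (hmask ▸ hm)
    rw [hcnil, if_pos hm]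
    cases reverse <;> simp [sorted_rev_nil_str]
  rw [if_neg hm]
  have hsubof : ∀ t ∈ combos (PySem.List.pyRange 0 n_orb 1) n_elec.toNat,
      t.Sublist (PySem.List.pyRange 0 n_orb 1) := fun t ht => mem_combos_sublist ht
  have hblen : ∀ tup : List Int, (blist n_orb tup).length = n_orb.toNat := by
    intro tup
    simp [blist, PySem.List.length_pyRange_one]
  have hbd : ∀ tup : List Int,
      (PySem.List.pyRange 0 n_orb 1).map (fun i => if n_orb - 1 - i ∈ tup then '1' else '0')
        = blist n_orb tup := fun _ => rfl
  have hancval : (if anc = "" then (0:Int) else pyBin anc.toList) = pyBin anc.toList := by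
    by_cases h : anc = "" <;> simp [h, pyBin]
  have hancrev : (if anc = "" then (0:Int) else pyBin anc.toList.reverse)
      = pyBin anc.toList.reverse := by
    by_cases h : anc = "" <;> simp [h, pyBin]
  cases reverse with
  | false =>
    simp only [if_neg (by decide : ¬ (false = true)), hancval, hmask, List.map_map]
    apply List.map_congr_left
    intro tup htup
    have hsub := hsubof tup htup
    simp only [Function.comp_apply, String.toList_ofList]
    rw [pyBin_append, hbd tup, pyBin_blist hsub, hblen tup]
  | true =>
    simp only [hancrev, hmask, List.map_map, hbd]
    simp only [if_true]
    -- the list of bit strings A builds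
    set S : List String := (combos (PySem.List.pyRange 0 n_orb 1) n_elec.toNat).map
      (fun tup => String.ofList (blist n_orb tup ++ anc.toList.reverse)) with hS
    have hinner : (combos (PySem.List.pyRange 0 n_orb 1) n_elec.toNat).map
        ((fun m => m * 2 ^ anc.toList.length + pyBin anc.toList.reverse) ∘ maskOf)
        = S.map (fun s => pyBin s.toList) := by
      rw [hS, List.map_map]
      apply List.map_congr_left
      intro tup htup
      simp only [Function.comp_apply, String.toList_ofList]
      rw [pyBin_append, pyBin_blist (hsubof tup htup), List.length_reverse]
    have hchars : ∀ s ∈ S, (∀ c ∈ s.toList, c = '0' ∨ c = '1') ∧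
        s.toList.length = n_orb.toNat + anc.toList.length := by
      intro s hs
      rw [hS] at hs
      obtain ⟨tup, -, rfl⟩ := List.mem_map.mp hs
      refine ⟨?_, by simp [String.toList_ofList, hblen tup]⟩
      intro c hc
      rw [String.toList_ofList, List.mem_append] at hc
      rcases hc with hc | hc
      · obtain ⟨i, -, rfl⟩ := List.mem_map.mp hc
        by_cases h : n_orb - 1 - i ∈ tup <;> simp [h]
      · exact hanc c (List.mem_reverse.mp hc)
    have hnd : S.Nodup := by
      rw [hS]
      refine List.Nodup.map_on ?_
        (nodup_combos _ _ (PySem.List.nodup_pyRange_one 0 n_orb))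
      intro t1 h1 t2 h2 heq
      have := congrArg String.toList heq
      rw [String.toList_ofList, String.toList_ofList] at this
      exact blist_inj (hsubof t1 h1) (hsubof t2 h2) (List.append_cancel_right this)
    have hmono : ∀ s ∈ S, ∀ t ∈ S, t ≤ s → t ≠ s → pyBin t.toList < pyBin s.toList := by
      intro s hs t ht hle hne
      rcases lt_or_eq_of_le hle with hlt | rfl
      · exact pyBin_strict_mono t.toList s.toList
          (by rw [(hchars t ht).2, (hchars s hs).2]) (hchars t ht).1 (hchars s hs).1
          (String.lt_iff_toList_lt.mp hlt)
      · exact absurd rfl hne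
    rw [hinner, sort_transfer S hnd hmono]
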